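-- pv_equiv track=rewrite | github.com/andreycizov/python-xmake | xmake/dsl.py | _map_eval_args
-- ===== SOURCE A (Python) =====
-- import string
--
-- EVAL_DICT = string.ascii_lowercase
--
-- def _map_eval_args(iter_obj):
--     """Build a locals dict for Eval"""
--
--     def _map_dict(x):
--         r = ''
--         while True:
--             next_idx = x % len(EVAL_DICT)
--             r += EVAL_DICT[next_idx]
--             x //= len(EVAL_DICT)
--
--             if x == 0:
--                 break
--         return r
--
--     r1, r2 = {}, {}
--     for i, v in enumerate(iter_obj):
--         r1[_map_dict(i)] = v
--         r2[f'x{i}'] = v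
--     return {**r1, **r2}
-- ===== SOURCE B (Python) =====
-- import string
--
-- def _map_eval_args(iter_obj):
--     """Build a locals dict for Eval"""
--     letters = string.ascii_lowercase
--     keys, xs = {}, {}
--     digits = [0]  # little-endian base-26 counter: current letter key
--     for i, v in enumerate(iter_obj):
--         keys[''.join(letters[d] for d in digits)] = v
--         xs['x%d' % i] = v
--         # increment the counter with carry
--         j = 0
--         while j < len(digits):
--             digits[j] += 1
--             if digits[j] == 26:
--                 digits[j] = 0
--                 j += 1
--             else:
--                 break
--         else:
--             digits.append(1)
--     return {**keys, **xs}
-- ===== Notes on version B (the rewrite author's own statement) =====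
-- stated objective: alternative
-- what changed: Replaced the per-index _map_dict division/modulo loop (recomputed from scratch for every i) by a little-endian base-26 counter incremented with carry once per iteration, rendered to the letter key before each step.
import Mathlib
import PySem

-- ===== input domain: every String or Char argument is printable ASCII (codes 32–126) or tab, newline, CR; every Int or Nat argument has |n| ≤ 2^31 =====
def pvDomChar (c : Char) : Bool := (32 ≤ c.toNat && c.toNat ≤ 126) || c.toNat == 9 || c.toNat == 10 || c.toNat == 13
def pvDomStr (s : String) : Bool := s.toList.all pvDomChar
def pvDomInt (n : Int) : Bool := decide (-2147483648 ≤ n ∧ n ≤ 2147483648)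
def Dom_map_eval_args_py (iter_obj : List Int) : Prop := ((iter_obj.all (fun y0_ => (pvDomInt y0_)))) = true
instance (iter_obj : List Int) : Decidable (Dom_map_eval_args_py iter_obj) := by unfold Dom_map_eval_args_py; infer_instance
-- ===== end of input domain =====

-- B replaces A's per-index division loop by a base-26 counter incremented with carry; alternative decomposition, same result.

-- ===== PORT A =====
-- EVAL_DICT = string.ascii_lowercase
def evalDict : List Char := "abcdefghijklmnopqrstuvwxyz".toList

-- the 'while True' body of _map_dict; fuel only makes the loop total (x.toNat + 1 suffices for x ≥ 0)
def mapDictGo : Nat → Int → List Char → List Char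
  | 0, _, r => r
  | fuel + 1, x, r =>
    let next_idx := PySem.Int.mod x 26                         -- x % len(EVAL_DICT)
    let r' := r ++ [PySem.List.pyGetD evalDict next_idx ' ']   -- r += EVAL_DICT[next_idx] (index always in range)
    let x' := PySem.Int.floordiv x 26                          -- x //= len(EVAL_DICT)
    if x' = 0 then r' else mapDictGo fuel x' r'

def mapDictA (x : Int) : String := String.mk (mapDictGo (x.toNat + 1) x [])

def map_eval_args_py (iter_obj : List Int) : List (String × Int) :=
  let rs := (PySem.List.enumerate iter_obj).foldl
    (fun (rs : PySem.Dict String Int × PySem.Dict String Int) iv =>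
      (rs.1.insert (mapDictA iv.1) iv.2,
       rs.2.insert (String.mk ('x' :: PySem.Int.toChars iv.1)) iv.2))   -- f'x{i}'
    (PySem.Dict.empty, PySem.Dict.empty)
  (PySem.Dict.ofList (rs.1.items ++ rs.2.items)).items                  -- {**r1, **r2}

-- ===== PORT B =====
-- increment the little-endian base-26 counter with carry (append 1 when the carry runs off the end)
def incDigits : List Nat → List Nat
  | [] => [1]
  | d :: ds => if d + 1 = 26 then 0 :: incDigits ds else (d + 1) :: ds

-- ''.join(letters[d] for d in digits)
def renderDigits (ds : List Nat) : List Char := ds.map (fun d => evalDict.getD d ' ')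

def map_eval_args_py_alt (iter_obj : List Int) : List (String × Int) :=
  let st := (PySem.List.enumerate iter_obj).foldl
    (fun (st : PySem.Dict String Int × PySem.Dict String Int × List Nat) iv =>
      (st.1.insert (String.mk (renderDigits st.2.2)) iv.2,
       st.2.1.insert (String.mk ('x' :: PySem.Int.toChars iv.1)) iv.2,
       incDigits st.2.2))
    (PySem.Dict.empty, PySem.Dict.empty, [0])
  (PySem.Dict.ofList (st.1.items ++ st.2.1.items)).items                -- {**keys, **xs}

-- ===== PRECONDITION & SPEC =====
def Spec_map_eval_args_py (iter_obj : List Int) (out : List (String × Int)) : Prop := out = map_eval_args_py_alt iter_obj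
instance (iter_obj : List Int) (out : List (String × Int)) : Decidable (Spec_map_eval_args_py iter_obj out) := by unfold Spec_map_eval_args_py; infer_instance

-- ===== CLAIM (what is proved, stated in full; the proofs are below) =====
def Claim_equal_map_eval_args_py : Prop := ∀ (iter_obj : List Int), Dom_map_eval_args_py iter_obj → Spec_map_eval_args_py iter_obj (map_eval_args_py iter_obj)

-- ===== LEMMAS AND PROOFS =====

-- canonical base-26 digits of n, least significant first (what A's loop reads off)
def digitsA (n : Nat) : List Nat :=
  n % 26 :: (if h : n / 26 = 0 then [] else digitsA (n / 26))
decreasing_by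
  have h0 : 0 < n := by
    rcases Nat.eq_zero_or_pos n with h1 | h1
    · exact absurd (by simp [h1]) h
    · exact h1
  exact Nat.div_lt_self h0 (by omega)

lemma digitsA_of_lt (n : Nat) (h : n < 26) : digitsA n = [n] := by
  rw [digitsA, dif_pos (by omega : n / 26 = 0), Nat.mod_eq_of_lt h]

lemma digitsA_of_ge (n : Nat) (h : 26 ≤ n) : digitsA n = n % 26 :: digitsA (n / 26) := by
  rw [digitsA, dif_neg (by omega : ¬ n / 26 = 0)]

lemma incDigits_digitsA (n : Nat) : incDigits (digitsA n) = digitsA (n + 1) := by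
  induction n using Nat.strong_induction_on with
  | _ n ih =>
    by_cases hge : 26 ≤ n
    · by_cases h25 : n % 26 = 25
      · rw [digitsA_of_ge n hge, digitsA_of_ge (n + 1) (by omega), h25]
        have h1 : (n + 1) % 26 = 0 := by omega
        have h2 : (n + 1) / 26 = n / 26 + 1 := by omega
        rw [h1, h2, ← ih (n / 26) (Nat.div_lt_self (by omega) (by omega))]
        simp [incDigits]
      · rw [digitsA_of_ge n hge, digitsA_of_ge (n + 1) (by omega)]
        have h1 : (n + 1) % 26 = n % 26 + 1 := by omega
        have h2 : (n + 1) / 26 = n / 26 := by omega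
        rw [h1, h2]
        simp [incDigits]
        omega
    · by_cases h25 : n = 25
      · subst h25
        rw [digitsA_of_lt 25 (by omega), digitsA_of_ge 26 (by omega)]
        rw [digitsA_of_lt (26 / 26) (by omega)]
        simp [incDigits]
      · rw [digitsA_of_lt n (by omega), digitsA_of_lt (n + 1) (by omega)]
        simp [incDigits]
        omega

lemma mod26 (n : Nat) : PySem.Int.mod (n : Int) 26 = ((n % 26 : Nat) : Int) := by
  rw [show ((26:Int)) = ((26:Nat):Int) from by norm_num, PySem.Int.mod_natCast]

lemma div26 (n : Nat) : PySem.Int.floordiv (n : Int) 26 = ((n / 26 : Nat) : Int) := by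
  rw [show ((26:Int)) = ((26:Nat):Int) from by norm_num, PySem.Int.floordiv_natCast]

lemma mapDictGo_eq (fuel : Nat) : ∀ (n : Nat) (r : List Char), n < fuel →
    mapDictGo fuel (n : Int) r = r ++ renderDigits (digitsA n) := by
  induction fuel with
  | zero => intro n r h; omega
  | succ fuel ih =>
    intro n r h
    rw [mapDictGo]
    simp only [mod26, div26, PySem.List.pyGetD_natCast, Nat.cast_eq_zero]
    by_cases h0 : n / 26 = 0
    · rw [if_pos h0, digitsA_of_lt n (by omega), Nat.mod_eq_of_lt (by omega)]
      simp [renderDigits]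
    · have hlt : n / 26 < fuel := by
        have := Nat.div_lt_self (show 0 < n by omega) (show 1 < 26 by omega)
        omega
      rw [if_neg h0, ih (n / 26) _ hlt, digitsA_of_ge n (by omega)]
      simp [renderDigits]

lemma mapDictA_eq (n : Nat) : mapDictA (n : Int) = String.mk (renderDigits (digitsA n)) := by
  rw [mapDictA, mapDictGo_eq (Int.toNat (n : Int) + 1) n [] (by simp), List.nil_append]

lemma fold_eq (xs : List Int) : ∀ (n : Nat) (d1 d2 : PySem.Dict String Int),
    (PySem.List.enumerate xs (n : Int)).foldl
      (fun (rs : PySem.Dict String Int × PySem.Dict String Int) iv =>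
        (rs.1.insert (mapDictA iv.1) iv.2,
         rs.2.insert (String.mk ('x' :: PySem.Int.toChars iv.1)) iv.2))
      (d1, d2)
    = (let st := (PySem.List.enumerate xs (n : Int)).foldl
        (fun (st : PySem.Dict String Int × PySem.Dict String Int × List Nat) iv =>
          (st.1.insert (String.mk (renderDigits st.2.2)) iv.2,
           st.2.1.insert (String.mk ('x' :: PySem.Int.toChars iv.1)) iv.2,
           incDigits st.2.2))
        (d1, d2, digitsA n);
       (st.1, st.2.1)) := by
  induction xs with
  | nil => intro n d1 d2; simp [PySem.List.enumerate]
  | cons x xs ih =>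
    intro n d1 d2
    rw [PySem.List.enumerate_cons]
    simp only [List.foldl_cons]
    have hcast : ((n : Int) + 1) = ((n + 1 : Nat) : Int) := by push_cast; ring
    rw [hcast, mapDictA_eq n, incDigits_digitsA n]
    exact ih (n + 1) _ _

-- ===== VERDICT (by name: the statement is the Claim_ definition above) =====
theorem map_eval_args_py_spec : Claim_equal_map_eval_args_py := by
  intro iter_obj _
  unfold Spec_map_eval_args_py map_eval_args_py map_eval_args_py_alt
  have h := fold_eq iter_obj 0 PySem.Dict.empty PySem.Dict.empty
  rw [digitsA_of_lt 0 (by omega)] at h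
  norm_num at h ⊢
  rw [h]
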